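-- pv_equiv track=rewrite | github.com/CHCICH/Music_diffusion | helper_LSTM.py | makeThemNotes
-- ===== SOURCE A (Python) =====
-- def makeThemNotes(Piece):
--     NotePerDuation = []
--     for piano_rolls in Piece:
--         note_played = 128 # in this case we label the note 128 as no notes are being played
--         for i in range(len(piano_rolls)):
--             note = piano_rolls[i]
--             if note > 0:
--                 note_played = i
--         NotePerDuation.append(note_played)
--     return NotePerDuation
-- ===== SOURCE B (Python) =====
-- def makeThemNotes(Piece):
--     # Reverse scan with early exit: first positive entry from the end is the
--     # last active note; default 128 when none.
--     return [next((i for i, v in reversed(list(enumerate(p))) if v > 0), 128)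
--             for p in Piece]
-- ===== Notes on version B (the rewrite author's own statement) =====
-- stated objective: idiomatic
-- what changed: Replaced the forward full scan with running overwrite of note_played by a reverse enumerate scan that returns the first positive entry from the end (next(...) with default 128), one comprehension per roll.
import Mathlib
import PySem

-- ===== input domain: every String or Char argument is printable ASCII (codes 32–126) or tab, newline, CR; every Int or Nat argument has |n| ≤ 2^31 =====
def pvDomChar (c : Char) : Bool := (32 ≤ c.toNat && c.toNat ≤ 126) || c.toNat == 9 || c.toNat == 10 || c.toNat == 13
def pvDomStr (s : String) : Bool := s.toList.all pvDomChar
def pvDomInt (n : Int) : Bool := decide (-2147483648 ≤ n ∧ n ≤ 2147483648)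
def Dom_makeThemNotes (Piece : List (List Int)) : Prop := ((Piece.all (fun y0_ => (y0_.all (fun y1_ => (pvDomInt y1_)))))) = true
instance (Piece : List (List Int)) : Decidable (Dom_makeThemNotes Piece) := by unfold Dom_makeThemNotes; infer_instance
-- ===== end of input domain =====

-- B replaces A's forward overwrite scan by a reverse enumerate scan with early exit (idiomatic, same cost).

-- ===== PORT A =====
-- forward scan: note_played overwritten at every positive entry
def makeThemNotes (Piece : List (List Int)) : List Int :=
  Piece.foldl
    (fun NotePerDuation piano_rolls =>
      NotePerDuation ++
        [(PySem.List.pyRange 0 (piano_rolls.length : Int) 1).foldl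
          (fun note_played i =>
            -- note = piano_rolls[i]; i is always in range here, so pyGetD is exact
            if PySem.List.pyGetD piano_rolls i 0 > 0 then i else note_played)
          128])
    []

-- ===== PORT B =====
-- next((i for i, v in reversed(list(enumerate(p))) if v > 0), 128)
def firstActive : List (Int × Int) → Int
  | [] => 128
  | (i, v) :: rest => if v > 0 then i else firstActive rest

def makeThemNotes_alt (Piece : List (List Int)) : List Int :=
  Piece.map (fun p => firstActive (PySem.List.enumerate p 0).reverse)

-- ===== PRECONDITION & SPEC =====
def Spec_makeThemNotes (Piece : List (List Int)) (out : List Int) : Prop := out = makeThemNotes_alt Piece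
instance (Piece : List (List Int)) (out : List Int) : Decidable (Spec_makeThemNotes Piece out) := by unfold Spec_makeThemNotes; infer_instance

-- ===== CLAIM (what is proved, stated in full; the proofs are below) =====
def Claim_equal_makeThemNotes : Prop := ∀ (Piece : List (List Int)), Dom_makeThemNotes Piece → Spec_makeThemNotes Piece (makeThemNotes Piece)

-- ===== LEMMAS AND PROOFS =====

-- firstActive generalized over the default value
def firstActiveD (d : Int) : List (Int × Int) → Int
  | [] => d
  | (i, v) :: rest => if v > 0 then i else firstActiveD d rest

theorem firstActiveD_append_singleton (l : List (Int × Int)) (x : Int × Int) (d : Int) :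
    firstActiveD d (l ++ [x]) = firstActiveD (if x.2 > 0 then x.1 else d) l := by
  induction l with
  | nil => simp [firstActiveD]
  | cons y l ih => cases y; simp [firstActiveD, ih]

theorem foldl_eq_firstActiveD (l : List (Int × Int)) (d : Int) :
    l.foldl (fun acc iv => if iv.2 > 0 then iv.1 else acc) d = firstActiveD d l.reverse := by
  induction l generalizing d with
  | nil => simp [firstActiveD]
  | cons x l ih =>
      cases x with
      | mk i v =>
        simp only [List.foldl_cons, List.reverse_cons, ih, firstActiveD_append_singleton]

theorem firstActive_eq_firstActiveD (l : List (Int × Int)) :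
    firstActive l = firstActiveD 128 l := by
  induction l with
  | nil => rfl
  | cons x l ih => cases x; simp [firstActive, firstActiveD, ih]

theorem roll_eq (p : List Int) :
    (PySem.List.pyRange 0 (p.length : Int) 1).foldl
      (fun note_played i => if PySem.List.pyGetD p i 0 > 0 then i else note_played) 128
    = firstActive (PySem.List.enumerate p 0).reverse := by
  rw [firstActive_eq_firstActiveD, ← foldl_eq_firstActiveD,
      PySem.List.enumerate_eq_map_pyRange (d := 0), List.foldl_map]
  simp [PySem.List.len]

-- ===== VERDICT (by name: the statement is the Claim_ definition above) =====
theorem makeThemNotes_spec : Claim_equal_makeThemNotes := by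
  intro Piece _
  unfold Spec_makeThemNotes makeThemNotes makeThemNotes_alt
  rw [PySem.List.foldl_append_singleton_eq_map]
  simp only [List.nil_append, roll_eq]
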